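-- pv_equiv track=rewrite | github.com/AlexTuisov/HW3 | HW3_submission/7_submission/hw3.py | find_opponent_zone_of_control
-- ===== SOURCE A (Python) =====
-- def find_opponent_zone_of_control(our_zone_of_control, fixed_dimensions):
--     fake_board = [[0 for _ in range(fixed_dimensions)]] * fixed_dimensions  # doesn't change
--     opponent_zone_of_control = []
--     for i in (range(len(fake_board))):
--         for j in (range(len(fake_board))):
--             if (i, j) not in our_zone_of_control:
--                 opponent_zone_of_control.append((i, j))
--
--     return opponent_zone_of_control
-- ===== SOURCE B (Python) =====
-- def find_opponent_zone_of_control(our_zone_of_control, fixed_dimensions):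
--     dim = fixed_dimensions
--     total = dim * dim if dim > 0 else 0
--     occupied = sorted({i * dim + j for (i, j) in our_zone_of_control
--                        if 0 <= i < dim and 0 <= j < dim})
--     result = []
--     prev = 0
--     for k in occupied:
--         for m in range(prev, k):
--             result.append((m // dim, m % dim))
--         prev = k + 1
--     for m in range(prev, total):
--         result.append((m // dim, m % dim))
--     return result
-- ===== Notes on version B (the rewrite author's own statement) =====
-- stated objective: alternative
-- what changed: B linearises the in-range zone cells to row-major indices i*dim+j, sorts the deduplicated indices, and emits the complement by filling the gaps between consecutive occupied indices, instead of testing every board cell for list membership in the zone.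
import Mathlib
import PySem

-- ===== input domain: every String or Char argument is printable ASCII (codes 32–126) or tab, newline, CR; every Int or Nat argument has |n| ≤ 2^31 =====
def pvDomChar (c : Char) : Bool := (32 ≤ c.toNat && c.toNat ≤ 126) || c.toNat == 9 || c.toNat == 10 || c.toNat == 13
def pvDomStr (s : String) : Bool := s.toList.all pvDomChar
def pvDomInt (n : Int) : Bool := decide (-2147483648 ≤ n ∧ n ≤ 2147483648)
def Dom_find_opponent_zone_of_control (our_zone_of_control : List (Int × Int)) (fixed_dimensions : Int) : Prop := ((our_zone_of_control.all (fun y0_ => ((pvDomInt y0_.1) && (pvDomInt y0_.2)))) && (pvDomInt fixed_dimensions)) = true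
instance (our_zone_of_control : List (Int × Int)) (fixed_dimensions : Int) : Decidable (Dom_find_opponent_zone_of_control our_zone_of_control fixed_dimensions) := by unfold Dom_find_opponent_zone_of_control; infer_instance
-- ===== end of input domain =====

-- B sorts the deduplicated row-major linearisations (i*dim+j) of the in-range zone cells and
-- emits the complement by filling the gaps between consecutive occupied indices, instead of
-- testing each board cell for membership in the zone list; same return value.

-- ===== PORT A =====
def find_opponent_zone_of_control (our_zone_of_control : List (Int × Int)) (fixed_dimensions : Int) : List (Int × Int) :=
  let fake_board : List (List Int) :=
    List.replicate fixed_dimensions.toNat (List.replicate fixed_dimensions.toNat 0)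
  (PySem.List.pyRange 0 (fake_board.length : Int) 1).foldl (fun acc i =>
    (PySem.List.pyRange 0 (fake_board.length : Int) 1).foldl (fun acc j =>
      if (i, j) ∉ our_zone_of_control then acc ++ [(i, j)] else acc) acc) []

-- ===== PORT B =====
-- (m // dim, m % dim): the board cell of linear index m
def pvCell (d m : Int) : Int × Int := (PySem.Int.floordiv m d, PySem.Int.mod m d)

def find_opponent_zone_of_control_alt (our_zone_of_control : List (Int × Int)) (fixed_dimensions : Int) : List (Int × Int) :=
  let dim := fixed_dimensions
  let total : Int := if dim > 0 then dim * dim else 0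
  let occupied : List Int :=
    PySem.List.sorted
      (PySem.Set.ofList
        ((our_zone_of_control.filter
            (fun c => decide (0 ≤ c.1 ∧ c.1 < dim ∧ 0 ≤ c.2 ∧ c.2 < dim))).map
          (fun c => c.1 * dim + c.2)))
      (fun x => x) false
  let st := occupied.foldl
      (fun (st : List (Int × Int) × Int) k =>
        (st.1 ++ (PySem.List.pyRange st.2 k 1).map (pvCell dim), k + 1)) ([], 0)
  st.1 ++ (PySem.List.pyRange st.2 total 1).map (pvCell dim)

-- ===== PRECONDITION & SPEC =====
def Spec_find_opponent_zone_of_control (our_zone_of_control : List (Int × Int)) (fixed_dimensions : Int) (out : List (Int × Int)) : Prop := out = find_opponent_zone_of_control_alt our_zone_of_control fixed_dimensions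
instance (our_zone_of_control : List (Int × Int)) (fixed_dimensions : Int) (out : List (Int × Int)) : Decidable (Spec_find_opponent_zone_of_control our_zone_of_control fixed_dimensions out) := by unfold Spec_find_opponent_zone_of_control; infer_instance

-- ===== CLAIM (what is proved, stated in full; the proofs are below) =====
def Claim_equal_find_opponent_zone_of_control : Prop := ∀ (our_zone_of_control : List (Int × Int)) (fixed_dimensions : Int), Dom_find_opponent_zone_of_control our_zone_of_control fixed_dimensions → Spec_find_opponent_zone_of_control our_zone_of_control fixed_dimensions (find_opponent_zone_of_control our_zone_of_control fixed_dimensions)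

-- ===== LEMMAS AND PROOFS =====

-- the gap-filling loop over a strictly increasing list s ⊆ [prev, n) produces exactly the
-- f-image of the complement of s in [prev, n)
lemma pvGaps (f : Int → Int × Int) (n : Int) :
    ∀ (s : List Int), s.Pairwise (· < ·) → ∀ (acc : List (Int × Int)) (prev : Int),
      (∀ k ∈ s, prev ≤ k ∧ k < n) →
      (s.foldl (fun st k => (st.1 ++ (PySem.List.pyRange st.2 k 1).map f, k + 1)) (acc, prev)).1
        ++ (PySem.List.pyRange
              (s.foldl (fun st k => (st.1 ++ (PySem.List.pyRange st.2 k 1).map f, k + 1)) (acc, prev)).2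
              n 1).map f
      = acc ++ ((PySem.List.pyRange prev n 1).filter (fun m => !(decide (m ∈ s)))).map f := by
  intro s hs
  induction s with
  | nil => intro acc prev _; simp
  | cons k t ih =>
    intro acc prev hb
    have hkt : ∀ x ∈ t, k < x := fun x hx => (List.pairwise_cons.mp hs).1 x hx
    have hk := hb k (List.mem_cons_self)
    rw [List.foldl_cons]
    rw [ih (List.pairwise_cons.mp hs).2 _ (k + 1)
      (fun x hx => ⟨by have := hkt x hx; omega, (hb x (List.mem_cons_of_mem _ hx)).2⟩)]
    have hsplit : PySem.List.pyRange prev n 1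
        = (PySem.List.pyRange prev k 1 ++ [k]) ++ PySem.List.pyRange (k + 1) n 1 := by
      rw [← PySem.List.pyRange_one_succ_right (by omega : prev ≤ k)]
      exact PySem.List.pyRange_one_append prev (k + 1) n (by omega) (by omega)
    rw [hsplit]
    rw [List.filter_append, List.filter_append]
    have h1 : (PySem.List.pyRange prev k 1).filter (fun m => !(decide (m ∈ k :: t)))
        = PySem.List.pyRange prev k 1 := by
      apply List.filter_eq_self.mpr
      intro m hm
      have hm' := (PySem.List.mem_pyRange_one).mp hm
      have hnm : ¬(m = k ∨ m ∈ t) := by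
        rintro (h | h)
        · omega
        · have := hkt m h; omega
      simp [List.mem_cons, hnm]
    have h2 : ([k] : List Int).filter (fun m => !(decide (m ∈ k :: t))) = [] := by
      simp
    have h3 : (PySem.List.pyRange (k + 1) n 1).filter (fun m => !(decide (m ∈ k :: t)))
        = (PySem.List.pyRange (k + 1) n 1).filter (fun m => !(decide (m ∈ t))) := by
      apply List.filter_congr
      intro m hm
      have hm' := (PySem.List.mem_pyRange_one).mp hm
      have hne : m ≠ k := by omega
      simp [List.mem_cons, hne]
    rw [h1, h2, h3]
    simp [List.map_append]

-- linear indices [0, a*d) read back, row-major, as the a×d grid of cells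
lemma pvRowMajor (d : Int) (hd : 0 < d) :
    ∀ (a : Nat),
      (PySem.List.pyRange 0 ((a : Int) * d) 1).map (pvCell d)
      = (PySem.List.pyRange 0 (a : Int) 1).flatMap
          (fun i => (PySem.List.pyRange 0 d 1).map (fun j => (i, j))) := by
  intro a
  induction a with
  | zero => simp [PySem.List.pyRange_one_eq_nil]
  | succ a ih =>
    have hcast : ((a + 1 : Nat) : Int) = (a : Int) + 1 := by push_cast; ring
    have he : ((a : Int) + 1) * d - (a : Int) * d = d := by ring
    have hsplit : PySem.List.pyRange 0 (((a : Int) + 1) * d) 1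
        = PySem.List.pyRange 0 ((a : Int) * d) 1
          ++ PySem.List.pyRange ((a : Int) * d) (((a : Int) + 1) * d) 1 := by
      apply PySem.List.pyRange_one_append
      · positivity
      · nlinarith
    rw [hcast, hsplit, List.map_append, ih,
      PySem.List.pyRange_one_succ_right (by positivity : (0 : Int) ≤ (a : Int)),
      List.flatMap_append]
    congr 1
    rw [PySem.List.pyRange_one ((a : Int) * d), he,
      PySem.List.pyRange_one 0 d]
    simp only [List.flatMap_cons, List.flatMap_nil, List.append_nil, List.map_map, sub_zero]
    apply List.map_congr_left
    intro k hk
    replace hk := List.mem_range.mp hk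
    have hk' : (k : Int) < d := by omega
    have hk0 : (0 : Int) ≤ (k : Int) := by positivity
    have hfd : PySem.Int.floordiv ((a : Int) * d + (k : Int)) d = (a : Int) := by
      rw [PySem.Int.floordiv_eq_iff_of_pos hd]
      constructor
      · linarith
      · linarith [he]
    have hmd : PySem.Int.mod ((a : Int) * d + (k : Int)) d = (k : Int) := by
      have h := PySem.Int.floordiv_mul_add_mod ((a : Int) * d + (k : Int)) d
      rw [hfd] at h
      linarith
    simp [pvCell, hfd, hmd, Function.comp]

-- membership bridge: for 0 ≤ m < d*d, m is an occupied linear index iff its cell is in the zone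
lemma pvMemBridge (zs : List (Int × Int)) (d m : Int) (hd : 0 < d)
    (hm0 : 0 ≤ m) (hmn : m < d * d) :
    (m ∈ (zs.filter (fun c => decide (0 ≤ c.1 ∧ c.1 < d ∧ 0 ≤ c.2 ∧ c.2 < d))).map
        (fun c => c.1 * d + c.2))
    ↔ pvCell d m ∈ zs := by
  constructor
  · intro h
    obtain ⟨c, hc, hcm⟩ := List.mem_map.mp h
    have hz := List.mem_filter.mp hc
    have hr := of_decide_eq_true hz.2
    have he : (c.1 + 1) * d = c.1 * d + d := by ring
    have hfd : PySem.Int.floordiv m d = c.1 := by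
      rw [PySem.Int.floordiv_eq_iff_of_pos hd]
      constructor
      · linarith [hr.2.2.1]
      · linarith [hr.2.2.2]
    have hmd : PySem.Int.mod m d = c.2 := by
      have h' := PySem.Int.floordiv_mul_add_mod m d
      rw [hfd] at h'
      linarith
    have : pvCell d m = c := by
      simp [pvCell, hfd, hmd]
    rw [this]
    exact hz.1
  · intro h
    apply List.mem_map.mpr
    refine ⟨pvCell d m, List.mem_filter.mpr ⟨h, ?_⟩, ?_⟩
    · apply decide_eq_true
      refine ⟨?_, ?_, ?_, ?_⟩
      · have h0 : (0 : Int) * d ≤ m := by linarith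
        exact (PySem.Int.le_floordiv_iff_mul_le hd).mpr h0
      · exact (PySem.Int.floordiv_lt_iff_lt_mul hd).mpr hmn
      · exact PySem.Int.mod_nonneg m hd
      · exact PySem.Int.mod_lt m hd
    · exact PySem.Int.floordiv_mul_add_mod m d

-- ===== VERDICT (by name: the statement is the Claim_ definition above) =====
theorem find_opponent_zone_of_control_spec : Claim_equal_find_opponent_zone_of_control := by
  intro zs d _
  unfold Spec_find_opponent_zone_of_control
  simp only [find_opponent_zone_of_control, find_opponent_zone_of_control_alt,
    List.length_replicate]
  by_cases hd : 0 < d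
  · have hdt : ((d.toNat : Int)) = d := by omega
    rw [hdt]
    -- A side → flatMap of filtered rows
    rw [PySem.List.foldl_congr_mem (PySem.List.pyRange 0 d 1) _
      (fun acc i => acc ++ ((PySem.List.pyRange 0 d 1).filter
        (fun j => decide ((i, j) ∉ zs))).map (fun j => (i, j))) []
      (fun acc i _ => PySem.List.foldl_append_ite (fun j => (i, j) ∉ zs) (fun j => (i, j))
        (PySem.List.pyRange 0 d 1) acc)]
    rw [PySem.List.foldl_append_eq_flatMap]
    -- B side → filtered linear range via the gap lemma
    have hif : (if d > 0 then d * d else 0) = d * d := if_pos hd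
    rw [hif]
    have hL := PySem.List.sorted_ofList_pairwise_lt
      ((zs.filter (fun c => decide (0 ≤ c.1 ∧ c.1 < d ∧ 0 ≤ c.2 ∧ c.2 < d))).map
        (fun c => c.1 * d + c.2))
    have hbnd : ∀ k ∈ PySem.List.sorted
        (PySem.Set.ofList
          ((zs.filter (fun c => decide (0 ≤ c.1 ∧ c.1 < d ∧ 0 ≤ c.2 ∧ c.2 < d))).map
            (fun c => c.1 * d + c.2))) (fun x => x) false,
        (0 : Int) ≤ k ∧ k < d * d := by
      intro k hk
      rw [PySem.List.mem_sorted, PySem.Set.mem_ofList] at hk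
      obtain ⟨c, hc, hck⟩ := List.mem_map.mp hk
      have hr := of_decide_eq_true (List.mem_filter.mp hc).2
      constructor
      · nlinarith [hr.1, hr.2.2.1, hr.2.1, hr.2.2.2]
      · nlinarith [hr.1, hr.2.2.1, hr.2.1, hr.2.2.2]
    rw [pvGaps (pvCell d) (d * d) _ hL [] 0 hbnd]
    simp only [List.nil_append]
    -- turn the index filter into a cell filter
    have hfc : (PySem.List.pyRange 0 (d * d) 1).filter
        (fun m => !(decide (m ∈ PySem.List.sorted
          (PySem.Set.ofList
            ((zs.filter (fun c => decide (0 ≤ c.1 ∧ c.1 < d ∧ 0 ≤ c.2 ∧ c.2 < d))).map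
              (fun c => c.1 * d + c.2))) (fun x => x) false)))
        = (PySem.List.pyRange 0 (d * d) 1).filter
            ((fun c => decide (c ∉ zs)) ∘ (pvCell d)) := by
      apply List.filter_congr
      intro m hm
      have hm' := (PySem.List.mem_pyRange_one).mp hm
      have hb := pvMemBridge zs d m hd hm'.1 hm'.2
      simp only [PySem.List.mem_sorted, PySem.Set.mem_ofList, Function.comp]
      have hb' : decide (m ∈ (zs.filter
            (fun c => decide (0 ≤ c.1 ∧ c.1 < d ∧ 0 ≤ c.2 ∧ c.2 < d))).map
            (fun c => c.1 * d + c.2)) = decide (pvCell d m ∈ zs) := by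
        rw [decide_eq_decide]
        exact hb
      rw [hb']
      simp
    rw [hfc, ← List.filter_map]
    have hrm := pvRowMajor d hd d.toNat
    rw [hdt] at hrm
    rw [hrm, List.filter_flatMap]
    apply List.flatMap_congr
    intro i _
    rw [List.filter_map]
    rfl
  · have hdt : d.toNat = 0 := by omega
    have hfil : zs.filter (fun c => decide (0 ≤ c.1 ∧ c.1 < d ∧ 0 ≤ c.2 ∧ c.2 < d)) = [] := by
      apply List.filter_eq_nil_iff.mpr
      intro c _
      simp only [decide_eq_true_eq]
      omega
    rw [hdt, hfil, if_neg hd]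
    rfl
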